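-- pv_equiv track=rewrite | github.com/DominataurusRex/Labyrinthe | Main.py | get_font_size
-- ===== SOURCE A (Python) =====
-- FONT_HEIGHT = [19, 20, 22, 23, 25, 26, 28, 29, 31, 32, 34, 35, 37,
--                38, 40, 41, 43, 44, 46, 47, 49, 50, 52, 53, 55, 56,
--                58, 59, 61, 62, 64, 65, 67, 68, 70, 71, 73, 74, 76,
--                77, 79, 80, 82, 83, 85, 86, 88, 89, 91, 92, 94, 95,
--                97, 98, 100, 101, 103, 104, 106, 107, 109, 110, 112,
--                113, 115, 116, 118, 119, 121, 122, 124, 125, 127, 128,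
--                130, 131, 133, 134, 136, 137, 139, 140, 142, 144, 145,
--                147, 148, 150, 151, 153, 154, 156, 157, 159, 160, 162,
--                163, 165, 166, 168, 169, 171, 172, 174, 175, 177, 178,
--                180, 181, 183, 184, 186, 187, 189, 190, 192, 193, 195,
--                196, 198, 199, 201, 202, 204, 205, 207, 208, 210, 211,
--                213, 214, 216, 217, 219, 220, 222, 223, 225, 226, 228,
--                229, 231, 232, 234, 235, 237, 238, 240, 241, 243, 244,
--                246, 247, 249, 250, 252, 253, 255, 256, 258, 259, 261,
--                262, 264, 265, 267, 268, 270, 271, 273, 274, 276, 277,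
--                279, 280, 282, 284, 285, 287, 288, 290, 291, 293, 294,
--                296, 297, 299, 300]
--
-- def get_font_size(font_height):
--     """récupère une valeur de taille de police selon `font_height` un entier
--     naturel représentant la hauteur de font voulu en nombre de pixel sur la
--     fenêtre de jeu."""
--     if font_height < 19:
--         return 12
--     else:
--         i = 0
--         try:
--             while font_height > FONT_HEIGHT[i]:
--                 i += 1
--         except IndexError:
--             pass
--         return i + 12
-- ===== SOURCE B (Python) =====
-- def get_font_size(font_height):
--     # The FONT_HEIGHT table is three arithmetic segments (pattern +1,+2 with
--     # phase breaks after 142 and 282); count entries below font_height in O(1).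
--     def seg(a, b):
--         n = min(b, font_height - 1) - a + 1
--         if n <= 0:
--             return 0
--         return n - n // 3
--     return 12 + seg(19, 142) + seg(144, 282) + seg(284, 300)
-- ===== Notes on version B (the rewrite author's own statement) =====
-- stated objective: alternative
-- what changed: Replaced A's linear while-scan over the lookup table (terminated by catching IndexError) with a closed-form O(1) arithmetic count: the table is three arithmetic segments (repeating +1,+2 steps with two phase breaks), so the number of entries below font_height is computed directly without the table.
import Mathlib
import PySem

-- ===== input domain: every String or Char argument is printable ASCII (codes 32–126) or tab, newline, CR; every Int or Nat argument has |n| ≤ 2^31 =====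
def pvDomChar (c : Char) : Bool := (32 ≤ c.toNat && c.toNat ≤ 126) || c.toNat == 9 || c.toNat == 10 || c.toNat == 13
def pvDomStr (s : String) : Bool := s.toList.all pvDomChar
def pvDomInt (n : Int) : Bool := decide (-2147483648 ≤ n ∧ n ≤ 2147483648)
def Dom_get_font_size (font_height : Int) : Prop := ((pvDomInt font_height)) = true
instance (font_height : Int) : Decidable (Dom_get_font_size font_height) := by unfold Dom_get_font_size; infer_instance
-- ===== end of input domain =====

set_option maxRecDepth 100000


-- B replaces A's linear table scan by a closed-form arithmetic count (no table at all).

def FONT_HEIGHT : List Int := [19, 20, 22, 23, 25, 26, 28, 29, 31, 32, 34, 35, 37,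
               38, 40, 41, 43, 44, 46, 47, 49, 50, 52, 53, 55, 56,
               58, 59, 61, 62, 64, 65, 67, 68, 70, 71, 73, 74, 76,
               77, 79, 80, 82, 83, 85, 86, 88, 89, 91, 92, 94, 95,
               97, 98, 100, 101, 103, 104, 106, 107, 109, 110, 112,
               113, 115, 116, 118, 119, 121, 122, 124, 125, 127, 128,
               130, 131, 133, 134, 136, 137, 139, 140, 142, 144, 145,
               147, 148, 150, 151, 153, 154, 156, 157, 159, 160, 162,
               163, 165, 166, 168, 169, 171, 172, 174, 175, 177, 178,
               180, 181, 183, 184, 186, 187, 189, 190, 192, 193, 195,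
               196, 198, 199, 201, 202, 204, 205, 207, 208, 210, 211,
               213, 214, 216, 217, 219, 220, 222, 223, 225, 226, 228,
               229, 231, 232, 234, 235, 237, 238, 240, 241, 243, 244,
               246, 247, 249, 250, 252, 253, 255, 256, 258, 259, 261,
               262, 264, 265, 267, 268, 270, 271, 273, 274, 276, 277,
               279, 280, 282, 284, 285, 287, 288, 290, 291, 293, 294,
               296, 297, 299, 300]

-- ===== PORT A =====
-- A's while-loop: advance i while font_height > FONT_HEIGHT[i]; the IndexError
-- (list exhausted) is the recursion's base case, returning the reached i.
def scanA (fh : Int) : List Int → Nat → Nat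
  | [], i => i
  | x :: xs, i => if fh > x then scanA fh xs (i + 1) else i

def get_font_size (font_height : Int) : Int :=
  if font_height < 19 then 12
  else (scanA font_height FONT_HEIGHT 0 : Int) + 12

-- ===== PORT B =====
-- B's closed form: the table is three arithmetic segments (repeating +1,+2
-- steps, phase breaks after 142 and 282); `seg fh a b` counts the segment's
-- entries below fh directly.  Python's `//` on a nonnegative n is floordiv.
def seg (fh a b : Int) : Int :=
  let n := min b (fh - 1) - a + 1
  if n ≤ 0 then 0 else n - PySem.Int.floordiv n 3

def get_font_size_alt (font_height : Int) : Int :=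
  12 + seg font_height 19 142 + seg font_height 144 282 + seg font_height 284 300

-- ===== PRECONDITION & SPEC =====
def Spec_get_font_size (font_height : Int) (out : Int) : Prop := out = get_font_size_alt font_height
instance (font_height : Int) (out : Int) : Decidable (Spec_get_font_size font_height out) := by unfold Spec_get_font_size; infer_instance

-- ===== CLAIM (what is proved, stated in full; the proofs are below) =====
def Claim_equal_get_font_size : Prop := ∀ (font_height : Int), Dom_get_font_size font_height → Spec_get_font_size font_height (get_font_size font_height)

-- ===== LEMMAS AND PROOFS =====

-- If fh exceeds every element of l, the scan runs off the end.
theorem scanA_all (fh : Int) : ∀ (l : List Int) (i : Nat),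
    (∀ y ∈ l, fh > y) → scanA fh l i = i + l.length := by
  intro l
  induction l with
  | nil => intro i _; simp [scanA]
  | cons x xs ih =>
      intro i H
      simp only [scanA]
      rw [if_pos (H x (by simp))]
      rw [ih (i + 1) (fun y hy => H y (by simp [hy]))]
      simp [List.length_cons]; omega

theorem fonts_le_300 : ∀ y ∈ FONT_HEIGHT, y ≤ (300 : Int) := by decide

-- B is eventually constant: for fh > 300 every segment is counted in full.
theorem alt_large (fh : Int) (h : 300 < fh) : get_font_size_alt fh = 200 := by
  have h1 : min (142 : Int) (fh - 1) = 142 := by omega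
  have h2 : min (282 : Int) (fh - 1) = 282 := by omega
  have h3 : min (300 : Int) (fh - 1) = 300 := by omega
  simp only [get_font_size_alt, seg, h1, h2, h3]
  norm_num [PySem.Int.floordiv_eq_ediv_of_pos]

-- B returns 12 below the table: every segment count is empty.
theorem alt_small (fh : Int) (h : fh < 19) : get_font_size_alt fh = 12 := by
  have h1 : min (142 : Int) (fh - 1) = fh - 1 := by omega
  have h2 : min (282 : Int) (fh - 1) = fh - 1 := by omega
  have h3 : min (300 : Int) (fh - 1) = fh - 1 := by omega
  simp only [get_font_size_alt, seg, h1, h2, h3]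
  rw [if_pos (by omega), if_pos (by omega), if_pos (by omega)]
  norm_num

-- The finite middle range, checked by evaluation.
theorem mid_range : ∀ k ∈ List.range 282, get_font_size (19 + (k : Int)) = get_font_size_alt (19 + (k : Int)) := by decide

-- ===== VERDICT (by name: the statement is the Claim_ definition above) =====
theorem get_font_size_spec : Claim_equal_get_font_size := by
  intro fh _
  unfold Spec_get_font_size
  by_cases h1 : fh < 19
  · simp [get_font_size, h1, alt_small fh h1]
  · by_cases h2 : fh ≤ 300
    · have hk : fh = 19 + ((fh - 19).toNat : Int) := by omega
      have hk2 : (fh - 19).toNat ∈ List.range 282 := by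
        simp [List.mem_range]; omega
      have := mid_range _ hk2
      rw [hk]; exact this
    · have hs : scanA fh FONT_HEIGHT 0 = FONT_HEIGHT.length := by
        rw [scanA_all]
        · simp
        · intro y hy; have := fonts_le_300 y hy; omega
      rw [alt_large fh (by omega)]
      simp [get_font_size, hs, h1]
      decide
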